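-- pv_equiv track=rewrite | github.com/Manfred-Madelaine-pro/py-primes | prime_digits.py | ewtract_digits
-- ===== SOURCE A (Python) =====
-- def ewtract_digits(primes, place):
-- 	digits = {}
-- 	for prime in primes:
-- 		s = str(prime)
-- 		if (len(s) >= place):
-- 			if s[-place] not in digits:
-- 				digits[s[-place]] = []
-- 			digits[s[-place]] += [prime]
--
-- 	return digits
-- ===== SOURCE B (Python) =====
-- def ewtract_digits(primes, place):
--     def key(p):
--         s = str(p)
--         return s[-place] if len(s) >= place else None
--     keys = []
--     for p in primes:
--         k = key(p)
--         if k is not None and k not in keys: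
--             keys.append(k)
--     return {k: [p for p in primes if key(p) == k] for k in keys}
-- ===== Notes on version B (the rewrite author's own statement) =====
-- stated objective: alternative
-- what changed: A builds a dict in one pass, mutating per element; B first collects the distinct digit keys in first-occurrence order and then builds each group by a separate filtering pass over the whole list (grouping by repeated filtration, no dict mutation).
import Mathlib
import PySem

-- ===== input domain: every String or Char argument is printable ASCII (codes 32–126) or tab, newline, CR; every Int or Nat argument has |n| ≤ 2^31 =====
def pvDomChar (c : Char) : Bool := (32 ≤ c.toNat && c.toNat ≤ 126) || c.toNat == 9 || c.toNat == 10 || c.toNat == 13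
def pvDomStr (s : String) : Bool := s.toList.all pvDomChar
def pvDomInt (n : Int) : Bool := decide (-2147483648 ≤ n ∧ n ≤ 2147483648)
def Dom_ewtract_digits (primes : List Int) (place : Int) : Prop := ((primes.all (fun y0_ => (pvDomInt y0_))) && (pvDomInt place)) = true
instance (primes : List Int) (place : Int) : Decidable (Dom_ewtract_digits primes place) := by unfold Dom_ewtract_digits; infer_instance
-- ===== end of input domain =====

-- B replaces A's one-pass dict mutation by "collect distinct keys in first-occurrence order,
-- then build each group by filtering the whole list per key" — alternative structure, same result.


-- ===== PORT A =====
-- one loop iteration of A (dict mutation per element); s[-place] is a one-char string: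
-- pyGet? = none is exactly Python's IndexError, excluded by Pre_ (the "" default is unreachable there)
def pvStepA (place : Int) (digits : PySem.Dict String (List Int)) (prime : Int) : PySem.Dict String (List Int) :=
  let s := PySem.Int.toStr prime
  if PySem.Str.len s ≥ place then
    let key := ((PySem.Str.pyGet? s (-place)).map (fun c => String.ofList [c])).getD ""
    let digits := if digits.contains key = false then digits.insert key ([] : List Int) else digits
    digits.insert key (digits.getD key [] ++ [prime])
  else digits

def ewtract_digits (primes : List Int) (place : Int) : List (String × List Int) :=
  (primes.foldl (pvStepA place) (PySem.Dict.empty : PySem.Dict String (List Int))).items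

-- ===== PORT B =====
-- B's helper key(p): s[-place] if len(s) >= place else None (pyGet? none = IndexError, outside Pre_)
def pvKeyB (place : Int) (p : Int) : Option String :=
  let s := PySem.Int.toStr p
  if PySem.Str.len s ≥ place then (PySem.Str.pyGet? s (-place)).map (fun c => String.ofList [c]) else none

-- one iteration of B's key-collection loop
def pvStepK (place : Int) (ks : List String) (p : Int) : List String :=
  match pvKeyB place p with
  | some k => if k ∈ ks then ks else ks ++ [k]
  | none => ks

def ewtract_digits_alt (primes : List Int) (place : Int) : List (String × List Int) :=
  let keys := primes.foldl (pvStepK place) ([] : List String)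
  keys.map (fun k => (k, primes.filter (fun p => pvKeyB place p == some k)))

-- ===== PRECONDITION & SPEC =====
-- Pre_ excludes exactly the inputs where Python A raises IndexError: some prime whose decimal
-- string s satisfies place <= -len(s), so that s[-place] is out of range (B raises there too).
def Pre_ewtract_digits (primes : List Int) (place : Int) : Prop :=
  ∀ p ∈ primes, -(PySem.Str.len (PySem.Int.toStr p)) < place
instance (primes : List Int) (place : Int) : Decidable (Pre_ewtract_digits primes place) := by unfold Pre_ewtract_digits; infer_instance

def pvWitness_ewtract_digits : List Int × Int := ([2, 3, 5, 23, 101], 1)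

def Spec_ewtract_digits (primes : List Int) (place : Int) (out : List (String × List Int)) : Prop := out = ewtract_digits_alt primes place
instance (primes : List Int) (place : Int) (out : List (String × List Int)) : Decidable (Spec_ewtract_digits primes place out) := by unfold Spec_ewtract_digits; infer_instance

-- ===== CLAIM (what is proved, stated in full; the proofs are below) =====
def Claim_equal_ewtract_digits : Prop := ∀ (primes : List Int) (place : Int), Dom_ewtract_digits primes place → Pre_ewtract_digits primes place → Spec_ewtract_digits primes place (ewtract_digits primes place)

-- ===== LEMMAS AND PROOFS =====

-- B's key-collection fold: membership and no-duplicates, for any accumulator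
theorem pvKeysFold_mem (place : Int) (xs : List Int) (acc : List String) (k : String) :
    k ∈ xs.foldl (pvStepK place) acc ↔ k ∈ acc ∨ ∃ p ∈ xs, pvKeyB place p = some k := by
  induction xs generalizing acc with
  | nil => simp
  | cons x xs ih =>
    simp only [List.foldl_cons, ih, List.mem_cons]
    unfold pvStepK
    cases hx : pvKeyB place x with
    | none =>
      constructor
      · rintro (h | ⟨p, hp, hk⟩)
        · exact Or.inl h
        · exact Or.inr ⟨p, Or.inr hp, hk⟩
      · rintro (h | ⟨p, hp | hp, hk⟩)
        · exact Or.inl h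
        · exact absurd hk (by rw [hp, hx]; simp)
        · exact Or.inr ⟨p, hp, hk⟩
    | some k' =>
      by_cases hk' : k' ∈ acc
      · simp only [hk', if_pos]
        constructor
        · rintro (h | ⟨p, hp, hk⟩)
          · exact Or.inl h
          · exact Or.inr ⟨p, Or.inr hp, hk⟩
        · rintro (h | ⟨p, hp | hp, hk⟩)
          · exact Or.inl h
          · refine Or.inl ?_
            rw [hp, hx] at hk
            exact (Option.some_inj.mp hk) ▸ hk'
          · exact Or.inr ⟨p, hp, hk⟩
      · simp only [hk', if_neg, not_false_iff, List.mem_append, List.mem_singleton]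
        constructor
        · rintro ((h | h) | ⟨p, hp, hk⟩)
          · exact Or.inl h
          · exact Or.inr ⟨x, Or.inl rfl, by rw [hx, h]⟩
          · exact Or.inr ⟨p, Or.inr hp, hk⟩
        · rintro (h | ⟨p, hp | hp, hk⟩)
          · exact Or.inl (Or.inl h)
          · refine Or.inl (Or.inr ?_)
            rw [hp, hx] at hk
            exact (Option.some_inj.mp hk).symm
          · exact Or.inr ⟨p, hp, hk⟩

theorem pvKeysFold_nodup (place : Int) (xs : List Int) (acc : List String) (h : acc.Nodup) :
    (xs.foldl (pvStepK place) acc).Nodup := by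
  induction xs generalizing acc with
  | nil => exact h
  | cons x xs ih =>
    refine ih _ ?_
    unfold pvStepK
    cases pvKeyB place x with
    | none => exact h
    | some k' =>
      by_cases hk' : k' ∈ acc
      · simpa [hk'] using h
      · show (if k' ∈ acc then acc else acc ++ [k']).Nodup
        rw [if_neg hk']
        refine List.Nodup.append h (List.nodup_singleton _) ?_
        simpa [List.disjoint_singleton] using hk'

-- under Pre_, when A's length guard passes, the indexing succeeds and agrees with B's key
theorem pvKey_of_guard (place p : Int)
    (hpre : -(PySem.Str.len (PySem.Int.toStr p)) < place)
    (hg : PySem.Str.len (PySem.Int.toStr p) ≥ place) :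
    ∃ k, pvKeyB place p = some k ∧
      ((PySem.Str.pyGet? (PySem.Int.toStr p) (-place)).map (fun c => String.ofList [c])).getD "" = k := by
  have hlist : (PySem.Int.toStr p).toList = PySem.Int.toChars p := PySem.Int.toList_toStr p
  have hlen : PySem.Str.len (PySem.Int.toStr p) = ((PySem.Int.toChars p).length : Int) := by
    rw [PySem.Str.len_eq, hlist]
  have hrange : PySem.Raise.InRange (PySem.Int.toChars p).length (-place) := by
    unfold PySem.Raise.InRange; omega
  have hex : ∃ c, PySem.List.pyGet? (PySem.Int.toChars p) (-place) = some c := by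
    rcases h : PySem.List.pyGet? (PySem.Int.toChars p) (-place) with _ | c
    · exact absurd hrange (by simpa using (PySem.List.pyGet?_eq_none_iff _ _).mp h)
    · exact ⟨c, rfl⟩
  obtain ⟨c, hc⟩ := hex
  refine ⟨String.ofList [c], ?_, ?_⟩
  · unfold pvKeyB
    rw [if_pos hg]
    simp [PySem.Str.pyGet?, hlist, hc]
  · simp [PySem.Str.pyGet?, hlist, hc]

-- the main invariant: A's dict after processing xs is exactly B's keys-with-groups over xs
theorem pvInvariant (place : Int) (xs : List Int)
    (hpre : ∀ p ∈ xs, -(PySem.Str.len (PySem.Int.toStr p)) < place) :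
    xs.foldl (pvStepA place) (PySem.Dict.empty : PySem.Dict String (List Int)) =
      PySem.Dict.mk ((xs.foldl (pvStepK place) []).map
        (fun k => (k, xs.filter (fun q => pvKeyB place q == some k)))) := by
  induction xs using List.reverseRecOn with
  | nil => rfl
  | append_singleton xs p ih =>
    have hpre' : ∀ q ∈ xs, -(PySem.Str.len (PySem.Int.toStr q)) < place :=
      fun q hq => hpre q (List.mem_append_left _ hq)
    rw [List.foldl_append, List.foldl_append, ih hpre']
    set K := xs.foldl (pvStepK place) [] with hK
    set f : String → String × List Int :=
      (fun k => (k, xs.filter (fun q => pvKeyB place q == some k))) with hf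
    set G : PySem.Dict String (List Int) := PySem.Dict.mk (K.map f) with hG
    have hKnd : K.Nodup := pvKeysFold_nodup place xs [] List.nodup_nil
    have hGkeys : G.keys = K := by
      show List.map Prod.fst (K.map f) = K
      rw [List.map_map]
      exact (List.map_congr_left (fun a _ => rfl)).trans (List.map_id K)
    by_cases hg : PySem.Str.len (PySem.Int.toStr p) ≥ place
    · obtain ⟨k, hk, hkey⟩ :=
        pvKey_of_guard place p (hpre p (List.mem_append_right _ (List.mem_singleton_self p))) hg
      have hstepA : List.foldl (pvStepA place) G [p] =
          (if G.contains k = false then G.insert k ([] : List Int) else G).insert k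
            ((if G.contains k = false then G.insert k ([] : List Int) else G).getD k [] ++ [p]) := by
        simp only [List.foldl_cons, List.foldl_nil]
        unfold pvStepA
        rw [if_pos hg, hkey]
      have hstepK : List.foldl (pvStepK place) K [p] = if k ∈ K then K else K ++ [k] := by
        simp [pvStepK, hk]
      rw [hstepA, hstepK]
      by_cases hmem : k ∈ K
      · have hcont : G.contains k = true := by
          rw [PySem.Dict.contains_eq_decide_mem_keys, hGkeys]; simp [hmem]
        rw [if_pos hmem, hcont, if_neg (by simp)]
        have hget : G.getD k [] = xs.filter (fun q => pvKeyB place q == some k) :=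
          PySem.Dict.getD_of_mem_items G (List.mem_map_of_mem hmem) (hGkeys ▸ hKnd) []
        rw [hget]
        apply PySem.Dict.ext
        rw [PySem.Dict.items_insert_of_contains _ _ hcont]
        show (K.map f).map _ = K.map _
        rw [List.map_map]
        refine List.map_congr_left ?_
        intro k' _
        by_cases hkk : k' = k
        · subst hkk
          simp [hf, List.filter_append, hk]
        · simp [hf, Function.comp, List.filter_append, hk,
            show (k' == k) = false by simp [hkk],
            show ((some k : Option String) == some k') = false by simp [Ne.symm hkk]]
      · have hcont : G.contains k = false := by
          rw [PySem.Dict.contains_eq_decide_mem_keys, hGkeys]; simp [hmem]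
        rw [if_neg hmem, hcont, if_pos rfl]
        have hget : (G.insert k ([] : List Int)).getD k [] = [] :=
          PySem.Dict.getD_insert_self G k [] []
        rw [hget]
        apply PySem.Dict.ext
        rw [PySem.Dict.items_insert_of_contains _ _ (PySem.Dict.contains_insert_self G k [])]
        rw [PySem.Dict.items_insert_of_not_contains _ _ hcont]
        have hGitems : G.items = K.map f := rfl
        rw [hGitems, List.map_append]
        have hfilnil : xs.filter (fun q => pvKeyB place q == some k) = [] := by
          rw [List.filter_eq_nil_iff]
          intro q hq hqk
          exact hmem ((pvKeysFold_mem place xs [] k).mpr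
            (Or.inr ⟨q, hq, by simpa using hqk⟩))
        show _ ++ _ = (K ++ [k]).map _
        rw [List.map_append]
        congr 1
        · rw [List.map_map]
          refine List.map_congr_left ?_
          intro k' hk'
          have hkk : k' ≠ k := fun h => hmem (h ▸ hk')
          simp [hf, Function.comp, List.filter_append, hk,
            show (k' == k) = false by simp [hkk],
            show ((some k : Option String) == some k') = false by simp [Ne.symm hkk]]
        · simp [List.filter_append, hk, hfilnil]
    · have hnone : pvKeyB place p = none := by unfold pvKeyB; rw [if_neg hg]
      have hA : List.foldl (pvStepA place) G [p] = G := by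
        simp only [List.foldl_cons, List.foldl_nil]
        unfold pvStepA
        rw [if_neg hg]
      rw [hA]
      simp only [List.foldl_cons, List.foldl_nil, pvStepK, hnone]
      refine congrArg PySem.Dict.mk (List.map_congr_left ?_)
      intro k _
      simp [hf, List.filter_append, hnone]

-- ===== VERDICT (by name: the statement is the Claim_ definition above) =====
theorem ewtract_digits_spec : Claim_equal_ewtract_digits := by
  intro primes place _ hpre
  show ewtract_digits primes place = ewtract_digits_alt primes place
  unfold ewtract_digits ewtract_digits_alt
  rw [pvInvariant place primes hpre]
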